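-- pv_equiv track=rewrite | github.com/encarnacao/computacao-I | lista7.py | ex5
-- ===== SOURCE A (Python) =====
-- def ex5(n):
--     fibonacci = [0]
--     i = 1
--     while i<n:
--         if i == 1:
--             fibonacci.append(1)
--         else:
--             fibonacci.append(fibonacci[i-1]+fibonacci[i-2])
--         i+=1
--     return sum(fibonacci),fibonacci
-- ===== SOURCE B (Python) =====
-- def ex5(n):
--     fib = []
--     a, b = 0, 1
--     for _ in range(max(n, 1)):
--         fib.append(a)
--         a, b = b, a + b
--     return b - 1, fib
-- ===== Notes on version B (the rewrite author's own statement) =====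
-- stated objective: alternative
-- what changed: B never sums the list: it generates the terms from a rolling (a,b) pair driven by a count-based for-range loop (no back-indexing, no i==1 branch) and returns the sum via the Fibonacci prefix-sum identity, as b minus one.
import Mathlib
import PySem

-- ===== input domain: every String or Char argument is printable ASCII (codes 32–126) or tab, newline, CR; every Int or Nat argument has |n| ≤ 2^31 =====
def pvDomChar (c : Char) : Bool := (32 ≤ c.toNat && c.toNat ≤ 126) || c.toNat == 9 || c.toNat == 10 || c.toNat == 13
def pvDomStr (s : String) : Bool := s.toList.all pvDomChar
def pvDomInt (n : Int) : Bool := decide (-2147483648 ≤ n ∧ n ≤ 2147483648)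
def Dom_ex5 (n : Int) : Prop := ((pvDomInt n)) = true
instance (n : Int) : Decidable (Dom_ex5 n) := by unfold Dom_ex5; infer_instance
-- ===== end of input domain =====

-- B drops the sum(fib) pass and the i==1/back-indexing loop: it rolls a scalar pair (a,b) over a count-based range loop and returns the sum via the Fibonacci prefix-sum identity instead (alternative decomposition, same O(n) cost).


-- ===== PORT A =====
-- A's while loop: state (fibonacci, i); indices i-1, i-2 are always in range
-- (0 ≤ i-2 and i-1 < i = length when the else branch runs) so the .getD 0 default is never taken.
def ex5_loopA (n : Int) (fib : List Int) (i : Int) : List Int :=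
  if _h : i < n then
    ex5_loopA n
      (if i = 1 then fib ++ [1]
       else fib ++ [((PySem.List.pyGet? fib (i - 1)).getD 0)
                     + ((PySem.List.pyGet? fib (i - 2)).getD 0)])
      (i + 1)
  else fib
termination_by (n - i).toNat
decreasing_by omega

def ex5 (n : Int) : Int × List Int :=
  let fib := ex5_loopA n [0] 1
  (fib.foldl (· + ·) 0, fib)

-- ===== PORT B =====
-- Source B: for _ in range(max(n,1)): fib.append(a); a, b = b, a+b; return b-1, fib
def ex5_alt (n : Int) : Int × List Int :=
  let st := (PySem.List.pyRange 0 (max n 1) 1).foldl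
    (fun (st : List Int × Int × Int) _ => (st.1 ++ [st.2.1], st.2.2, st.2.1 + st.2.2))
    ([], 0, 1)
  (st.2.2 - 1, st.1)

-- ===== PRECONDITION & SPEC =====
def Spec_ex5 (n : Int) (out : Int × List Int) : Prop := out = ex5_alt n
instance (n : Int) (out : Int × List Int) : Decidable (Spec_ex5 n out) := by unfold Spec_ex5; infer_instance

-- ===== CLAIM (what is proved, stated in full; the proofs are below) =====
def Claim_equal_ex5 : Prop := ∀ (n : Int), Dom_ex5 n → Spec_ex5 n (ex5 n)

-- ===== LEMMAS AND PROOFS =====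

-- canonical description shared by the two proofs: the first k Fibonacci numbers from pair p
def fibAux : Nat → Int × Int → List Int
  | 0, _ => []
  | k+1, p => p.1 :: fibAux k (p.2, p.1 + p.2)

-- k-fold iteration of (a,b) ↦ (b, a+b)
def pairIter : Nat → Int × Int → Int × Int
  | 0, p => p
  | k+1, p => pairIter k (p.2, p.1 + p.2)

theorem pairIter_succ' (k : Nat) (p : Int × Int) :
    pairIter (k+1) p = ((pairIter k p).2, (pairIter k p).1 + (pairIter k p).2) := by
  induction k generalizing p with
  | zero => rfl
  | succ k ih => rw [pairIter, ih, pairIter]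

theorem fibAux_snoc (k : Nat) (p : Int × Int) :
    fibAux (k+1) p = fibAux k p ++ [(pairIter k p).1] := by
  induction k generalizing p with
  | zero => rfl
  | succ k ih =>
    rw [fibAux, ih, fibAux]
    simp [pairIter]

theorem fibAux_get? (k j : Nat) (p : Int × Int) (h : j < k) :
    (fibAux k p)[j]? = some ((pairIter j p).1) := by
  induction k generalizing j p with
  | zero => omega
  | succ k ih =>
    cases j with
    | zero => rfl
    | succ j => simpa [fibAux, pairIter] using ih j (p.2, p.1 + p.2) (by omega)

theorem fibAux_foldl_add (k : Nat) (p : Int × Int) (c : Int) :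
    (fibAux k p).foldl (· + ·) c = c + (pairIter k p).2 - p.2 := by
  induction k generalizing p c with
  | zero => simp [fibAux, pairIter]
  | succ k ih =>
    rw [fibAux, List.foldl_cons, ih, pairIter]
    ring_nf

-- B's fold depends only on the length of the range it folds over
theorem foldB_eq (l : List Int) (acc : List Int) (p : Int × Int) :
    l.foldl (fun (st : List Int × Int × Int) _ =>
        (st.1 ++ [st.2.1], st.2.2, st.2.1 + st.2.2)) (acc, p)
      = (acc ++ fibAux l.length p, pairIter l.length p) := by
  induction l generalizing acc p with
  | nil => simp [fibAux, pairIter]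
  | cons x xs ih =>
    rw [List.foldl_cons, ih, List.length_cons, fibAux, pairIter]
    simp

-- A's loop reaches the canonical list
theorem loopA_eq (n : Int) (k : Nat) (hk : 1 ≤ k) :
    ex5_loopA n (fibAux k (0, 1)) (k : Int) = fibAux (max n (k : Int)).toNat (0, 1) := by
  by_cases h : (k : Int) < n
  · rw [ex5_loopA.eq_def, dif_pos h]
    have hstep :
        (if (k : Int) = 1 then fibAux k (0,1) ++ [1]
         else fibAux k (0,1) ++ [((PySem.List.pyGet? (fibAux k (0,1)) ((k:Int) - 1)).getD 0)
              + ((PySem.List.pyGet? (fibAux k (0,1)) ((k:Int) - 2)).getD 0)])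
        = fibAux (k+1) (0,1) := by
      by_cases hk1 : (k : Int) = 1
      · have : k = 1 := by omega
        subst this
        decide
      · rw [if_neg hk1]
        have hk2 : 2 ≤ k := by omega
        have e1 : ((k : Int) - 1) = ((k - 1 : Nat) : Int) := by omega
        have e2 : ((k : Int) - 2) = ((k - 2 : Nat) : Int) := by omega
        rw [e1, e2, PySem.List.pyGet?_natCast, PySem.List.pyGet?_natCast,
          fibAux_get? k (k-1) _ (by omega), fibAux_get? k (k-2) _ (by omega),
          fibAux_snoc]
        have hsum : (pairIter (k-1) (0,1)).1 + (pairIter (k-2) (0,1)).1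
            = (pairIter k (0,1)).1 := by
          obtain ⟨j, rfl⟩ : ∃ j, k = j + 2 := ⟨k - 2, by omega⟩
          simp only [Nat.add_sub_cancel, show j + 2 - 1 = j + 1 from by omega]
          rw [pairIter_succ' (j+1), pairIter_succ' j]
          ring
        simp [hsum]
    rw [hstep]
    have hrec := loopA_eq n (k+1) (by omega)
    rw [show ((k : Int) + 1) = ((k + 1 : Nat) : Int) by push_cast; ring, hrec]
    congr 2
    omega
  · rw [ex5_loopA.eq_def, dif_neg h]
    congr 1
    omega
termination_by (n - k).toNat
decreasing_by omega

-- ===== VERDICT (by name: the statement is the Claim_ definition above) =====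
theorem ex5_spec : Claim_equal_ex5 := by
  intro n _
  unfold Spec_ex5 ex5 ex5_alt
  have hA := loopA_eq n 1 le_rfl
  have h1 : fibAux 1 (0, 1) = [0] := rfl
  rw [h1] at hA
  have hlen : (PySem.List.pyRange 0 (max n 1) 1).length = (max n 1).toNat := by
    rw [PySem.List.length_pyRange_one]; congr 1; omega
  have hB := foldB_eq (PySem.List.pyRange 0 (max n 1) 1) [] (0, 1)
  rw [hlen] at hB
  simp only [Nat.cast_one] at hA
  rw [hA, hB]
  simp only [List.nil_append]
  rw [fibAux_foldl_add]
  congr 1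
  ring
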